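-- pv_equiv track=rewrite | github.com/mirrezaei/aynaz_interview_code25 | dynamic/constructArray.py | countArray3
-- ===== SOURCE A (Python) =====
-- def countArray3(n, k, x):#Dynamic approach in order O(kn)
--     a=[[0 for i in range(k+1) ] for j in range(n+1)]
--     a[1][1]=1
--     for i in range(2,n+1):
--         for j in range(1,k+1):
--             for k in range(1,k+1):
--                 if(k!=j):
--                     a[i][j]=(a[i][j]+a[i-1][k])%(10**9+7)
--
--     return a[n][x]%(10**9+7)
-- ===== SOURCE B (Python) =====
-- def countArray3(n, k, x):
--     # O(n*k): keep one row; next[j] = (rowtotal - row[j]) % MOD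
--     MOD = 10**9 + 7
--     row = [0] * (k + 1)
--     row[1] = 1
--     for _ in range(2, n + 1):
--         total = sum(row) % MOD
--         row = [0] + [(total - row[j]) % MOD for j in range(1, k + 1)]
--     return row[x] % MOD
-- ===== Notes on version B (the rewrite author's own statement) =====
-- stated objective: faster
-- what changed: Replaces the (n x k)-table DP with inner sum over all previous columns (O(n*k^2)) by a single rolling row whose total is computed once per step, so next[j] = (total - row[j]) % MOD (O(n*k)).
import Mathlib
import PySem

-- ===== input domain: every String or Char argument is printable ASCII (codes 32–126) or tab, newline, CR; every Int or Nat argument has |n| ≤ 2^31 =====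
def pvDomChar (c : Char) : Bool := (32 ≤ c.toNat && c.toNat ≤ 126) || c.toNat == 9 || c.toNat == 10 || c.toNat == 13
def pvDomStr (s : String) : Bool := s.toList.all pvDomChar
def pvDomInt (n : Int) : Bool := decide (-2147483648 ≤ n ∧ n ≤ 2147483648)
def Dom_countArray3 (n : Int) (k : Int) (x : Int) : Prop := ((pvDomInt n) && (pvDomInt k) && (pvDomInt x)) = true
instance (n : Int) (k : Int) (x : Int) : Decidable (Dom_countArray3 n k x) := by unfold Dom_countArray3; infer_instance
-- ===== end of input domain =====

-- B replaces A's O(n*k^2) table DP by an O(n*k) rolling row using next[j] = (total - row[j]) % MOD.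

-- ===== PORT A =====
-- Outer-loop body of A: 'for j in range(1,k+1): for k in range(1,k+1): if k!=j: a[i][j]=(a[i][j]+a[i-1][k])%p'.
-- Python's inner loop rebinds k, but its last value is the original k whenever it runs, so every range is range(1,k+1)
-- with the parameter k (and when k<1 Python already raised at a[1][1], outside Pre_).
def pvAInner (k : Int) (i : Int) (a : List (List Int)) : List (List Int) :=
  (PySem.List.pyRange 1 (k+1) 1).foldl (fun a j =>
    (PySem.List.pyRange 1 (k+1) 1).foldl (fun a kk =>
      if kk ≠ j then
        PySem.List.pySetD a i (PySem.List.pySetD (PySem.List.pyGetD a i [])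
          j ((PySem.List.pyGetD (PySem.List.pyGetD a i []) j 0 +
              PySem.List.pyGetD (PySem.List.pyGetD a (i-1) []) kk 0) % 1000000007))
      else a) a) a

def countArray3 (n : Int) (k : Int) (x : Int) : Int :=
  let a0 : List (List Int) :=
    (PySem.List.pyRange 0 (n+1) 1).map (fun _ => (PySem.List.pyRange 0 (k+1) 1).map (fun _ => (0:Int)))
  let a1 := PySem.List.pySetD a0 1 (PySem.List.pySetD (PySem.List.pyGetD a0 1 []) 1 1)
  let a2 := (PySem.List.pyRange 2 (n+1) 1).foldl (fun a i => pvAInner k i a) a1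
  (PySem.List.pyGetD (PySem.List.pyGetD a2 n []) x 0) % 1000000007

-- ===== PORT B =====
def countArray3_alt (n : Int) (k : Int) (x : Int) : Int :=
  let row0 : List Int := PySem.List.pySetD (List.replicate (k+1).toNat (0:Int)) 1 1
  let row := (PySem.List.pyRange 2 (n+1) 1).foldl (fun row _ =>
      let total := (row.foldl (· + ·) 0) % 1000000007
      0 :: (PySem.List.pyRange 1 (k+1) 1).map (fun j => (total - PySem.List.pyGetD row j 0) % 1000000007)) row0
  (PySem.List.pyGetD row x 0) % 1000000007

-- ===== PRECONDITION & SPEC =====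
-- Exactly where A returns: n ≥ 1 and k ≥ 1 (else a[1][1] raises IndexError) and x a valid Python index
-- into a row of length k+1 (else a[n][x] raises IndexError).
def Pre_countArray3 (n : Int) (k : Int) (x : Int) : Prop :=
  1 ≤ n ∧ 1 ≤ k ∧ -(k+1) ≤ x ∧ x ≤ k
instance (n : Int) (k : Int) (x : Int) : Decidable (Pre_countArray3 n k x) := by
  unfold Pre_countArray3; infer_instance

def pvWitness_countArray3 : Int × Int × Int := (3, 2, 1)

def Spec_countArray3 (n : Int) (k : Int) (x : Int) (out : Int) : Prop := out = countArray3_alt n k x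
instance (n : Int) (k : Int) (x : Int) (out : Int) : Decidable (Spec_countArray3 n k x out) := by
  unfold Spec_countArray3; infer_instance

-- ===== CLAIM (what is proved, stated in full; the proofs are below) =====
def Claim_equal_countArray3 : Prop := ∀ (n : Int) (k : Int) (x : Int), Dom_countArray3 n k x → Pre_countArray3 n k x → Spec_countArray3 n k x (countArray3 n k x)

-- ===== LEMMAS AND PROOFS =====

def pvStep (k : Int) (r : List Int) : List Int :=
  0 :: (PySem.List.pyRange 1 (k+1) 1).map
    (fun j => ((r.foldl (· + ·) 0) % 1000000007 - PySem.List.pyGetD r j 0) % 1000000007)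

def pvRows (k : Int) : Nat → List Int
  | 0 => PySem.List.pySetD (List.replicate (k+1).toNat (0:Int)) 1 1
  | t+1 => pvStep k (pvRows k t)

-- B's fold ignores the loop index, so it iterates pvStep.
theorem pv_foldl_const {α β : Type} (f : β → β) : ∀ (l : List α) (b : β),
    l.foldl (fun s _ => f s) b = f^[l.length] b := by
  intro l
  induction l with
  | nil => intro b; rfl
  | cons a l ih => intro b; simp [List.foldl_cons, ih, Function.iterate_succ_apply]

theorem pv_iterate_rows (k : Int) (t : Nat) :
    (pvStep k)^[t] (pvRows k 0) = pvRows k t := by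
  induction t with
  | zero => rfl
  | succ t ih => rw [Function.iterate_succ_apply', ih]; rfl

theorem pv_alt_eq (n k x : Int) :
    countArray3_alt n k x = (PySem.List.pyGetD (pvRows k (n-1).toNat) x 0) % 1000000007 := by
  show (PySem.List.pyGetD ((PySem.List.pyRange 2 (n+1) 1).foldl
      (fun row (_ : Int) => pvStep k row) (pvRows k 0)) x 0) % 1000000007 = _
  rw [pv_foldl_const (pvStep k), PySem.List.length_pyRange_one,
    show (n+1-2).toNat = (n-1).toNat from by omega, pv_iterate_rows]

-- pyGetD / pySetD on nonnegative Int indices, via getD/set on Nat.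
theorem pv_getD_nonneg {α : Type} (xs : List α) (i : Int) (d : α) (h : 0 ≤ i) :
    PySem.List.pyGetD xs i d = xs.getD i.toNat d := by
  rcases Int.eq_ofNat_of_zero_le h with ⟨m, rfl⟩
  simp [PySem.List.pyGetD_natCast]

theorem pv_get_set_self {α : Type} (xs : List α) (i : Int) (v d : α)
    (h0 : 0 ≤ i) (h : i.toNat < xs.length) :
    PySem.List.pyGetD (PySem.List.pySetD xs i v) i d = v := by
  rw [PySem.List.pySetD_of_nonneg _ _ h0, pv_getD_nonneg _ _ _ h0]
  simp [List.getD, List.getElem?_set_self h]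

theorem pv_get_set_ne {α : Type} (xs : List α) (i j : Int) (v d : α)
    (h0 : 0 ≤ i) (h0' : 0 ≤ j) (hne : j ≠ i) :
    PySem.List.pyGetD (PySem.List.pySetD xs i v) j d = PySem.List.pyGetD xs j d := by
  rw [PySem.List.pySetD_of_nonneg _ _ h0, pv_getD_nonneg _ _ _ h0', pv_getD_nonneg _ _ _ h0']
  have : i.toNat ≠ j.toNat := by omega
  simp [List.getD, List.getElem?_set_ne this]

theorem pv_set_getD_self {α : Type} (xs : List α) (i : Int) (d : α)
    (h0 : 0 ≤ i) (h : i.toNat < xs.length) :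
    PySem.List.pySetD xs i (PySem.List.pyGetD xs i d) = xs := by
  rw [PySem.List.pySetD_of_nonneg _ _ h0, pv_getD_nonneg _ _ _ h0,
    List.getD_eq_getElem xs d h]
  exact List.set_getElem_self h

theorem pv_set_set {α : Type} (xs : List α) (i : Int) (v w : α) (h0 : 0 ≤ i) :
    PySem.List.pySetD (PySem.List.pySetD xs i v) i w = PySem.List.pySetD xs i w := by
  rw [PySem.List.pySetD_of_nonneg _ _ h0, PySem.List.pySetD_of_nonneg _ _ h0,
    PySem.List.pySetD_of_nonneg _ _ h0, List.set_set]

theorem pv_len_set {α : Type} (xs : List α) (i : Int) (v : α) :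
    (PySem.List.pySetD xs i v).length = xs.length := by
  exact PySem.List.length_pySetD xs i v

-- innermost k'-loop: only entry (i,j) changes, accumulating the modular sum
theorem pv_inner_k (P : Int) (i j : Int) (h1 : 1 ≤ i) (hj : 0 ≤ j) :
    ∀ (l : List Int) (a : List (List Int)),
      i.toNat < a.length → j.toNat < (PySem.List.pyGetD a i []).length →
      l.foldl (fun a kk =>
        if kk ≠ j then
          PySem.List.pySetD a i (PySem.List.pySetD (PySem.List.pyGetD a i [])
            j ((PySem.List.pyGetD (PySem.List.pyGetD a i []) j 0 +
                PySem.List.pyGetD (PySem.List.pyGetD a (i-1) []) kk 0) % P))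
        else a) a
      = PySem.List.pySetD a i (PySem.List.pySetD (PySem.List.pyGetD a i []) j
          (l.foldl (fun c kk => if kk ≠ j then
              (c + PySem.List.pyGetD (PySem.List.pyGetD a (i-1) []) kk 0) % P else c)
            (PySem.List.pyGetD (PySem.List.pyGetD a i []) j 0))) := by
  intro l
  induction l with
  | nil =>
    intro a hlen hjlen
    rw [List.foldl_nil, List.foldl_nil, pv_set_getD_self _ _ _ hj hjlen,
      pv_set_getD_self _ _ _ (by omega) hlen]
  | cons kk l ih =>
    intro a hlen hjlen
    rw [List.foldl_cons, List.foldl_cons]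
    by_cases hkk : kk ≠ j
    · rw [if_pos hkk, if_pos hkk]
      have hi0 : (0:Int) ≤ i := by omega
      have hrow1 : PySem.List.pyGetD (PySem.List.pySetD a i
          (PySem.List.pySetD (PySem.List.pyGetD a i []) j
            ((PySem.List.pyGetD (PySem.List.pyGetD a i []) j 0 +
              PySem.List.pyGetD (PySem.List.pyGetD a (i-1) []) kk 0) % P))) i [] =
          PySem.List.pySetD (PySem.List.pyGetD a i []) j
            ((PySem.List.pyGetD (PySem.List.pyGetD a i []) j 0 +
              PySem.List.pyGetD (PySem.List.pyGetD a (i-1) []) kk 0) % P) :=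
        pv_get_set_self _ _ _ _ hi0 hlen
      have hprev1 : PySem.List.pyGetD (PySem.List.pySetD a i
          (PySem.List.pySetD (PySem.List.pyGetD a i []) j
            ((PySem.List.pyGetD (PySem.List.pyGetD a i []) j 0 +
              PySem.List.pyGetD (PySem.List.pyGetD a (i-1) []) kk 0) % P))) (i-1) [] =
          PySem.List.pyGetD a (i-1) [] :=
        pv_get_set_ne _ _ _ _ _ hi0 (by omega) (by omega)
      rw [ih _ (by rw [pv_len_set]; exact hlen)
        (by rw [hrow1, pv_len_set]; exact hjlen), hrow1, hprev1,
        pv_get_set_self _ _ _ _ hj hjlen, pv_set_set _ _ _ _ hj, pv_set_set _ _ _ _ hi0]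
    · rw [if_neg hkk, if_neg hkk]
      exact ih a hlen hjlen

-- middle j-loop: row i is rewritten entry by entry, the previous row (read each iteration) never changes
theorem pv_inner_j (P k i : Int) (prev : List Int) (h1 : 1 ≤ i) :
    ∀ (l : List Int) (a : List (List Int)),
      (∀ j ∈ l, 0 ≤ j ∧ j.toNat < (PySem.List.pyGetD a i []).length) →
      i.toNat < a.length →
      PySem.List.pyGetD a (i-1) [] = prev →
      l.foldl (fun a j =>
        (PySem.List.pyRange 1 (k+1) 1).foldl (fun a kk =>
          if kk ≠ j then
            PySem.List.pySetD a i (PySem.List.pySetD (PySem.List.pyGetD a i [])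
              j ((PySem.List.pyGetD (PySem.List.pyGetD a i []) j 0 +
                  PySem.List.pyGetD (PySem.List.pyGetD a (i-1) []) kk 0) % P))
          else a) a) a
      = PySem.List.pySetD a i
          (l.foldl (fun r j => PySem.List.pySetD r j
            ((PySem.List.pyRange 1 (k+1) 1).foldl
              (fun c kk => if kk ≠ j then (c + PySem.List.pyGetD prev kk 0) % P else c)
              (PySem.List.pyGetD r j 0))) (PySem.List.pyGetD a i [])) := by
  intro l
  induction l with
  | nil =>
    intro a _ hlen hprev
    rw [List.foldl_nil, List.foldl_nil, pv_set_getD_self _ _ _ (by omega) hlen]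
  | cons j l ih =>
    intro a hmem hlen hprev
    obtain ⟨hj0, hjlen⟩ := hmem j (by simp)
    rw [List.foldl_cons, List.foldl_cons,
      pv_inner_k P i j h1 hj0 (PySem.List.pyRange 1 (k+1) 1) a hlen hjlen, hprev]
    have hi0 : (0:Int) ≤ i := by omega
    have hrow1 : PySem.List.pyGetD (PySem.List.pySetD a i
        (PySem.List.pySetD (PySem.List.pyGetD a i []) j
          ((PySem.List.pyRange 1 (k+1) 1).foldl
            (fun c kk => if kk ≠ j then (c + PySem.List.pyGetD prev kk 0) % P else c)
            (PySem.List.pyGetD (PySem.List.pyGetD a i []) j 0)))) i [] =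
        PySem.List.pySetD (PySem.List.pyGetD a i []) j
          ((PySem.List.pyRange 1 (k+1) 1).foldl
            (fun c kk => if kk ≠ j then (c + PySem.List.pyGetD prev kk 0) % P else c)
            (PySem.List.pyGetD (PySem.List.pyGetD a i []) j 0)) :=
      pv_get_set_self _ _ _ _ hi0 hlen
    rw [ih _ (by
        intro j' hj'
        obtain ⟨h1', h2'⟩ := hmem j' (by simp [hj'])
        refine ⟨h1', ?_⟩
        rw [hrow1, pv_len_set]
        exact h2')
      (by rw [pv_len_set]; exact hlen)
      (by rw [pv_get_set_ne _ _ _ _ _ hi0 (by omega) (by omega)]; exact hprev),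
      hrow1, pv_set_set _ _ _ _ hi0]

theorem pv_foldl_sum : ∀ (l : List Int) (c : Int), l.foldl (· + ·) c = c + l.sum := by
  intro l
  induction l with
  | nil => intro c; simp
  | cons x l ih => intro c; rw [List.foldl_cons, ih, List.sum_cons]; ring

theorem pv_modfold (P : Int) (g : Int → Int) (j : Int) :
    ∀ (l : List Int) (c : Int),
      l.foldl (fun c kk => if kk ≠ j then (c + g kk) % P else c) (c % P)
      = (c + (l.map (fun kk => if kk ≠ j then g kk else 0)).sum) % P := by
  intro l
  induction l with
  | nil => intro c; simp
  | cons kk l ih =>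
    intro c
    rw [List.foldl_cons, List.map_cons, List.sum_cons]
    by_cases hkk : kk ≠ j
    · rw [if_pos hkk, if_pos hkk, Int.add_emod, Int.emod_emod_of_dvd _ dvd_rfl,
        ← Int.add_emod, ih]
      ring_nf
    · rw [if_neg hkk, if_neg hkk, ih]
      ring_nf

-- the value A accumulates for column j equals B's (total - prev[j]) % P
theorem pv_row_eq (P k : Int) (prev : List Int) (hk : 1 ≤ k)
    (hlen : prev.length = (k+1).toNat) (h0 : PySem.List.pyGetD prev 0 0 = 0)
    (j : Int) (hj : 1 ≤ j) (hjk : j ≤ k) :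
    (PySem.List.pyRange 1 (k+1) 1).foldl
      (fun c kk => if kk ≠ j then (c + PySem.List.pyGetD prev kk 0) % P else c) 0
    = ((prev.foldl (· + ·) 0) % P - PySem.List.pyGetD prev j 0) % P := by
  have hm := pv_modfold P (fun kk => PySem.List.pyGetD prev kk 0) j
    (PySem.List.pyRange 1 (k+1) 1) 0
  rw [Int.zero_emod] at hm
  rw [hm, pv_foldl_sum, zero_add, zero_add]
  have hsplit : PySem.List.pyRange 1 (k+1) 1
      = PySem.List.pyRange 1 j 1 ++ j :: PySem.List.pyRange (j+1) (k+1) 1 := by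
    rw [PySem.List.pyRange_one_append 1 j (k+1) (by omega) (by omega)]
    congr 1
    exact PySem.List.pyRange_one_cons (by omega)
  have hpt : ∀ (l : List Int), (∀ kk ∈ l, kk ≠ j) →
      (l.map (fun kk => if kk ≠ j then PySem.List.pyGetD prev kk 0 else 0)).sum
      = (l.map (fun kk => PySem.List.pyGetD prev kk 0)).sum := by
    intro l hl
    congr 1
    exact List.map_congr_left (fun kk hkk => if_pos (hl kk hkk))
  have hdrop : ((PySem.List.pyRange 1 (k+1) 1).map
        (fun kk => PySem.List.pyGetD prev kk 0)).sum = prev.sum := by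
    have hb : k + 1 = (prev.length : Int) := by omega
    rw [hb, PySem.List.map_pyGetD_pyRange' prev 0 (by omega)]
    cases prev with
    | nil => simp
    | cons h tl =>
      rw [PySem.List.pyGetD_zero_cons] at h0
      simp [h0]
  rw [hsplit] at hdrop ⊢
  simp only [List.map_append, List.sum_append, List.map_cons, List.sum_cons] at hdrop ⊢
  rw [hpt _ (by intro kk hkk; rw [PySem.List.mem_pyRange_one] at hkk; omega),
    hpt _ (by intro kk hkk; rw [PySem.List.mem_pyRange_one] at hkk; omega),
    if_neg (by simp)]
  have harith : ((PySem.List.pyRange 1 j 1).map (fun kk => PySem.List.pyGetD prev kk 0)).sum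
      + (0 + ((PySem.List.pyRange (j+1) (k+1) 1).map (fun kk => PySem.List.pyGetD prev kk 0)).sum)
      = prev.sum - PySem.List.pyGetD prev j 0 := by omega
  rw [harith, Int.sub_emod]
  conv_rhs => rw [Int.sub_emod, Int.emod_emod_of_dvd _ dvd_rfl]

-- writing columns aa..k into a row that is still zero there yields prefix ++ computed values
theorem pv_setfold (P k : Int) (prev : List Int) :
    ∀ (t : Nat) (aa : Int) (r : List Int), 1 ≤ aa → (k+1-aa).toNat = t →
      r.length = (k+1).toNat →
      (∀ j : Int, aa ≤ j → j ≤ k → PySem.List.pyGetD r j 0 = 0) →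
      (PySem.List.pyRange aa (k+1) 1).foldl (fun r j => PySem.List.pySetD r j
        ((PySem.List.pyRange 1 (k+1) 1).foldl
          (fun c kk => if kk ≠ j then (c + PySem.List.pyGetD prev kk 0) % P else c)
          (PySem.List.pyGetD r j 0))) r
      = r.take aa.toNat ++ (PySem.List.pyRange aa (k+1) 1).map
          (fun j => (PySem.List.pyRange 1 (k+1) 1).foldl
            (fun c kk => if kk ≠ j then (c + PySem.List.pyGetD prev kk 0) % P else c) 0) := by
  intro t
  induction t with
  | zero =>
    intro aa r h1 ht hlen _
    rw [PySem.List.pyRange_one_eq_nil (a:=aa) (b:=k+1) (by omega), List.foldl_nil, List.map_nil,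
      List.append_nil, List.take_of_length_le (by omega)]
  | succ t ih =>
    intro aa r h1 ht hlen hz
    rw [PySem.List.pyRange_one_cons (by omega : aa < k+1), List.foldl_cons, List.map_cons,
      hz aa (le_refl aa) (by omega)]
    rw [ih (aa+1) _ (by omega) (by omega) (by rw [pv_len_set]; exact hlen)
      (by
        intro j hj1 hj2
        rw [pv_get_set_ne _ _ _ _ _ (by omega) (by omega) (by omega)]
        exact hz j (by omega) hj2)]
    have hmlt : aa.toNat < r.length := by omega
    rw [PySem.List.pySetD_of_nonneg _ _ (by omega),
      List.set_eq_take_cons_drop _ hmlt]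
    have hl1 : (r.take aa.toNat).length = aa.toNat := by
      rw [List.length_take]; omega
    rw [List.take_append, List.take_of_length_le (by omega),
      show ((aa+1).toNat - (r.take aa.toNat).length) = 1 from by omega,
      List.take_succ_cons, List.take_zero]
    simp

theorem pv_getD_replicate {α : Type} (nn : Nat) (c d : α) (i : Int)
    (h0 : 0 ≤ i) (h : i.toNat < nn) :
    PySem.List.pyGetD (List.replicate nn c) i d = c := by
  rw [pv_getD_nonneg _ _ _ h0]
  simp [List.getD, h]

theorem pv_getD_replicate_zero (nn : Nat) (i : Int) :
    PySem.List.pyGetD (List.replicate nn (0:Int)) i 0 = 0 := by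
  by_cases h : PySem.Raise.InRange (List.replicate nn (0:Int)).length i
  · have := PySem.List.pyGetD_mem (xs := List.replicate nn (0:Int)) (d := 0) (i := i) h
    simp [List.eq_of_mem_replicate this]
  · exact PySem.List.pyGetD_of_none _ _ _ ((PySem.List.pyGet?_eq_none_iff _ _).mpr h)

theorem pv_rows_prop (k : Int) (hk : 1 ≤ k) (t : Nat) :
    (pvRows k t).length = (k+1).toNat ∧ PySem.List.pyGetD (pvRows k t) 0 0 = 0 := by
  cases t with
  | zero =>
    constructor
    · show (PySem.List.pySetD (List.replicate (k+1).toNat (0:Int)) 1 1).length = _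
      rw [pv_len_set, List.length_replicate]
    · show PySem.List.pyGetD (PySem.List.pySetD (List.replicate (k+1).toNat (0:Int)) 1 1) 0 0 = 0
      rw [pv_get_set_ne _ _ _ _ _ (by omega) (by omega) (by omega)]
      exact pv_getD_replicate _ _ _ _ (by omega) (by omega)
  | succ t =>
    constructor
    · show ((0:Int) :: (PySem.List.pyRange 1 (k+1) 1).map _).length = _
      rw [List.length_cons, List.length_map, PySem.List.length_pyRange_one]
      omega
    · exact PySem.List.pyGetD_zero_cons _ _ _

-- filling row i from the all-zero row produces exactly B's step applied to the previous row
theorem pv_newrow (k : Int) (prev : List Int) (hk : 1 ≤ k)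
    (hlen : prev.length = (k+1).toNat) (h0 : PySem.List.pyGetD prev 0 0 = 0) :
    (PySem.List.pyRange 1 (k+1) 1).foldl (fun r j => PySem.List.pySetD r j
        ((PySem.List.pyRange 1 (k+1) 1).foldl
          (fun c kk => if kk ≠ j then (c + PySem.List.pyGetD prev kk 0) % 1000000007 else c)
          (PySem.List.pyGetD r j 0))) (List.replicate (k+1).toNat 0)
      = pvStep k prev := by
  rw [pv_setfold 1000000007 k prev k.toNat 1 (List.replicate (k+1).toNat 0) (by omega)
    (by omega) (by rw [List.length_replicate]) (fun j _ _ => pv_getD_replicate_zero _ j)]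
  rw [show (1:Int).toNat = 1 from rfl, List.take_replicate,
    show min 1 (k+1).toNat = 1 from by omega]
  show (0:Int) :: _ = pvStep k prev
  unfold pvStep
  congr 1
  exact List.map_congr_left (fun j hj => by
    rw [PySem.List.mem_pyRange_one] at hj
    exact pv_row_eq 1000000007 k prev hk hlen h0 j hj.1 (by omega))

def pvA1 (n k : Int) : List (List Int) :=
  PySem.List.pySetD (List.replicate (n+1).toNat (List.replicate (k+1).toNat (0:Int))) 1
    (PySem.List.pySetD
      (PySem.List.pyGetD (List.replicate (n+1).toNat (List.replicate (k+1).toNat (0:Int))) 1 []) 1 1)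

def pvAState (n k m : Int) : List (List Int) :=
  (PySem.List.pyRange 2 (m+1) 1).foldl (fun a i => pvAInner k i a) (pvA1 n k)

theorem pv_a0 (n k : Int) :
    (PySem.List.pyRange 0 (n+1) 1).map (fun _ => (PySem.List.pyRange 0 (k+1) 1).map (fun _ => (0:Int)))
      = List.replicate (n+1).toNat (List.replicate (k+1).toNat 0) := by
  rw [List.map_const', List.map_const', PySem.List.length_pyRange_one,
    PySem.List.length_pyRange_one]
  norm_num

theorem pv_outer (n k : Int) (hn : 1 ≤ n) (hk : 1 ≤ k) :
    ∀ (t : Nat) (m : Int), m = 1 + (t : Int) → m ≤ n →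
      (pvAState n k m).length = (n+1).toNat
      ∧ PySem.List.pyGetD (pvAState n k m) m [] = pvRows k (m-1).toNat
      ∧ ∀ j : Int, m < j → j ≤ n →
          PySem.List.pyGetD (pvAState n k m) j [] = List.replicate (k+1).toNat 0 := by
  intro t
  induction t with
  | zero =>
    intro m hm hmn
    have hm1 : m = 1 := by omega
    subst hm1
    unfold pvAState
    rw [PySem.List.pyRange_one_eq_nil (by omega), List.foldl_nil]
    unfold pvA1
    refine ⟨?_, ?_, ?_⟩
    · rw [pv_len_set, List.length_replicate]
    · rw [pv_get_set_self _ _ _ _ (by omega) (by rw [List.length_replicate]; omega),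
        pv_getD_replicate _ _ _ _ (by omega) (by omega)]
      rfl
    · intro j hj1 hj2
      rw [pv_get_set_ne _ _ _ _ _ (by omega) (by omega) (by omega),
        pv_getD_replicate _ _ _ _ (by omega) (by omega)]
  | succ t ih =>
    intro m hm hmn
    obtain ⟨ihlen, ihrow, ihz⟩ := ih (m-1) (by omega) (by omega)
    have hm2 : 2 ≤ m := by omega
    have hstate : pvAState n k m = pvAInner k m (pvAState n k (m-1)) := by
      unfold pvAState
      rw [show m + 1 = (m-1+1) + 1 from by ring, PySem.List.pyRange_one_succ_right (by omega),
        List.foldl_append, List.foldl_cons, List.foldl_nil, show m - 1 + 1 = m from by ring]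
    have hprevlen := (pv_rows_prop k hk (m-1-1).toNat).1
    have hprev0 := (pv_rows_prop k hk (m-1-1).toNat).2
    have hrowm : PySem.List.pyGetD (pvAState n k (m-1)) m [] = List.replicate (k+1).toNat 0 :=
      ihz m (by omega) hmn
    have hinner : pvAInner k m (pvAState n k (m-1))
        = PySem.List.pySetD (pvAState n k (m-1)) m (pvStep k (pvRows k (m-1-1).toNat)) := by
      unfold pvAInner
      rw [pv_inner_j 1000000007 k m (pvRows k (m-1-1).toNat) (by omega)
        (PySem.List.pyRange 1 (k+1) 1) (pvAState n k (m-1))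
        (by
          intro j hj
          rw [PySem.List.mem_pyRange_one] at hj
          refine ⟨by omega, ?_⟩
          rw [hrowm, List.length_replicate]
          omega)
        (by rw [ihlen]; omega)
        ihrow]
      rw [hrowm, pv_newrow k _ hk hprevlen hprev0]
    rw [hstate, hinner]
    have hrows : pvStep k (pvRows k (m-1-1).toNat) = pvRows k (m-1).toNat := by
      rw [show (m-1).toNat = (m-1-1).toNat + 1 from by omega]
      rfl
    refine ⟨?_, ?_, ?_⟩
    · rw [pv_len_set]; exact ihlen
    · rw [pv_get_set_self _ _ _ _ (by omega) (by rw [ihlen]; omega), hrows]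
    · intro j hj1 hj2
      rw [pv_get_set_ne _ _ _ _ _ (by omega) (by omega) (by omega)]
      exact ihz j (by omega) hj2

-- ===== VERDICT (by name: the statement is the Claim_ definition above) =====
theorem countArray3_spec : Claim_equal_countArray3 := by
  intro n k x _ hpre
  obtain ⟨hn, hk, _, _⟩ := hpre
  show countArray3 n k x = countArray3_alt n k x
  have hA : countArray3 n k x
      = (PySem.List.pyGetD (PySem.List.pyGetD (pvAState n k n) n []) x 0) % 1000000007 := by
    unfold countArray3 pvAState pvA1
    rw [pv_a0]
  rw [hA, (pv_outer n k hn hk (n-1).toNat n (by omega) (le_refl n)).2.1,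
    pv_alt_eq]
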